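-- pv_equiv track=rewrite | github.com/phoanghuong86/leetcode-daily-challenges | 13Aug-30. Substring with Concatenation of All Words.py | allword
-- ===== SOURCE A (Python) =====
-- from typing import List
--
-- def allword(s: str, words: List[str]) -> bool:
--     len_word = len(words[0])
--     no_words = [s[i:(i + len_word)] for i in range(0, len(s), len_word) ]
--     for w in words:
--         if w in no_words:
--             no_words.remove(w)
--         else: return False
--     return True
-- ===== SOURCE B (Python) =====
-- def allword(s, words):
--     len_word = len(words[0])
--     chunks = sorted(s[i:(i + len_word)] for i in range(0, len(s), len_word))
--     j = 0
--     for w in sorted(words):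
--         while j < len(chunks) and chunks[j] < w:
--             j += 1
--         if j < len(chunks) and chunks[j] == w:
--             j += 1
--         else:
--             return False
--     return True
-- ===== Notes on version B (the rewrite author's own statement) =====
-- stated objective: alternative
-- what changed: Replaces A's repeated linear membership test and list.remove per word by sorting the chunk list and the words once and running a single two-pointer merge that consumes one matching chunk per word.
import Mathlib
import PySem

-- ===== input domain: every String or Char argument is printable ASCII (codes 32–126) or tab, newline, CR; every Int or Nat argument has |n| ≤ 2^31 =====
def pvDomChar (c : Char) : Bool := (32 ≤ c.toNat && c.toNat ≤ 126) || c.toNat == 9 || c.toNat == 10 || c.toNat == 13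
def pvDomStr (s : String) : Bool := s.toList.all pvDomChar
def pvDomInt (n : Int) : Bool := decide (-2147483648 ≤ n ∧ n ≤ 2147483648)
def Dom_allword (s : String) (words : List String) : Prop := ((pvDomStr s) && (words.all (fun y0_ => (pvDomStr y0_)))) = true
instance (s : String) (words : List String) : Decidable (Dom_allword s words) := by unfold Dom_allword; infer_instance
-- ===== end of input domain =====

-- B sorts the chunk list and the words once and runs a single two-pointer merge,
-- replacing A's per-word linear membership test and list.remove (objective: alternative).

-- ===== PORT A =====
-- chunk list [s[i:i+len_word] for i in range(0, len(s), len_word)] (both Pythons build it with this very comprehension)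
def allwordChunks (s : String) (lw : Int) : List String :=
  (PySem.List.pyRange 0 (PySem.Str.len s) lw).map (fun i => PySem.Str.slice s (some i) (some (i + lw)))

-- A's for-loop: membership test then .remove (PySem.List.remove? is exactly 'if w in nw: nw.remove(w)')
def allwordLoopA : List String → List String → Bool
  | [], _ => true
  | w :: ws, nw =>
    match PySem.List.remove? nw w with
    | some rest => allwordLoopA ws rest
    | none => false

def allword (s : String) (words : List String) : Bool :=
  allwordLoopA words (allwordChunks s (PySem.Str.len (words.headD "")))

-- ===== PORT B =====
-- B's merge loop: for each word (in sorted order) skip strictly smaller chunks,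
-- consume an equal chunk, otherwise fail — Source B's pointer j becomes the chunk-list tail
def allwordMerge : List String → List String → Bool
  | [], _ => true
  | _ :: _, [] => false
  | w :: ws, c :: cs =>
    if c < w then allwordMerge (w :: ws) cs
    else if c = w then allwordMerge ws cs
    else false
termination_by ws cs => ws.length + cs.length

def allword_alt (s : String) (words : List String) : Bool :=
  allwordMerge (PySem.List.sorted words (fun x => x) false)
    (PySem.List.sorted (allwordChunks s (PySem.Str.len (words.headD ""))) (fun x => x) false)

-- ===== PRECONDITION & SPEC =====
-- Pre_ excludes exactly the inputs where Python A raises: empty words (IndexError on words[0])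
-- and an empty first word (ValueError: range() arg 3 must not be zero); B raises there too.
def Pre_allword (s : String) (words : List String) : Prop :=
  words ≠ [] ∧ (words.headD "").toList ≠ []
instance (s : String) (words : List String) : Decidable (Pre_allword s words) := by
  unfold Pre_allword; infer_instance
def pvWitness_allword : String × List String := ("abab", ["ab", "ab"])

def Spec_allword (s : String) (words : List String) (out : Bool) : Prop := out = allword_alt s words
instance (s : String) (words : List String) (out : Bool) : Decidable (Spec_allword s words out) := by unfold Spec_allword; infer_instance

-- ===== CLAIM (what is proved, stated in full; the proofs are below) =====
def Claim_equal_allword : Prop := ∀ (s : String) (words : List String), Dom_allword s words → Pre_allword s words → Spec_allword s words (allword s words)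

-- ===== LEMMAS AND PROOFS =====

-- A's loop succeeds iff the words form a sub-multiset of the chunks.
theorem allwordLoopA_iff (ws : List String) :
    ∀ nw : List String, (allwordLoopA ws nw = true ↔ ∀ k, ws.count k ≤ nw.count k) := by
  induction ws with
  | nil => intro nw; simp [allwordLoopA]
  | cons w ws ih =>
    intro nw
    simp only [allwordLoopA]
    cases hrem : PySem.List.remove? nw w with
    | none =>
      have hmem : w ∉ nw := (PySem.List.remove?_eq_none_iff nw w).mp hrem
      have hc : nw.count w = 0 := List.count_eq_zero.mpr hmem
      constructor
      · intro h; cases h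
      · intro h
        have hw := h w
        rw [List.count_cons_self, hc] at hw
        omega
    | some rest =>
      have hmem : w ∈ nw := by
        by_contra hmemn
        rw [(PySem.List.remove?_eq_none_iff nw w).mpr hmemn] at hrem
        cases hrem
      have hcpos : 1 ≤ nw.count w := List.one_le_count_iff.mpr hmem
      have hrest : rest = nw.erase w := by
        rw [PySem.List.remove?_eq_some_erase nw w hmem] at hrem
        exact (Option.some.injEq _ _).mp hrem.symm
      subst hrest
      rw [ih]
      constructor
      · intro h k
        have hk2 := h k
        by_cases hk : k = w
        · subst hk
          rw [List.count_erase_self] at hk2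
          rw [List.count_cons_self]
          omega
        · rw [List.count_erase_of_ne hk] at hk2
          rw [List.count_cons_of_ne (Ne.symm hk)]
          exact hk2
      · intro h k
        have hk2 := h k
        by_cases hk : k = w
        · subst hk
          rw [List.count_cons_self] at hk2
          rw [List.count_erase_self]
          omega
        · rw [List.count_cons_of_ne (Ne.symm hk)] at hk2
          rw [List.count_erase_of_ne hk]
          exact hk2

-- B's merge on two (≤)-sorted lists succeeds iff the first is a sublist of the second.
theorem allwordMerge_iff : ∀ (ws cs : List String),
    ws.Pairwise (· ≤ ·) → cs.Pairwise (· ≤ ·) →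
    (allwordMerge ws cs = true ↔ List.Sublist ws cs) := by
  intro ws cs
  induction ws, cs using allwordMerge.induct with
  | case1 cs => intro _ _; simp [allwordMerge]
  | case2 w ws => intro _ _; simp [allwordMerge]
  | case3 w ws c cs hlt ih =>
    intro h1 h2
    rw [allwordMerge, if_pos hlt, ih h1 h2.tail]
    constructor
    · exact fun h => h.cons c
    · intro h
      cases h with
      | cons _ h => exact h
      | cons₂ _ h => exact absurd hlt (lt_irrefl _)
  | case4 ws c cs hlt ih =>
    intro h1 h2
    rw [allwordMerge, if_neg hlt, if_pos rfl, ih h1.tail h2.tail]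
    exact (List.cons_sublist_cons).symm
  | case5 w ws c cs hlt hne =>
    intro h1 h2
    rw [allwordMerge, if_neg hlt, if_neg hne]
    simp only [Bool.false_eq_true, false_iff]
    intro h
    have hw : w ∈ c :: cs := h.subset List.mem_cons_self
    have hcw : c < w := by
      rcases List.mem_cons.mp hw with h' | h'
      · exact absurd h' (fun e => hne e.symm)
      · have hle : c ≤ w := (List.pairwise_cons.mp h2).1 w h'
        rcases lt_or_eq_of_le hle with h'' | h''
        · exact h''
        · exact absurd h'' hne
    exact hlt hcw

-- Sublist of sorted lists ↔ sub-multiset of the originals.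
theorem sorted_sublist_iff_count (ws cs : List String) :
    List.Sublist (PySem.List.sorted ws (fun x => x) false) (PySem.List.sorted cs (fun x => x) false)
      ↔ ∀ k, ws.count k ≤ cs.count k := by
  constructor
  · intro h k
    have hsub : List.Subperm ws cs :=
      ((PySem.List.sorted_perm ws (fun x => x) false).symm.subperm.trans h.subperm).trans
        (PySem.List.sorted_perm cs (fun x => x) false).subperm
    exact hsub.count_le k
  · intro h
    have hsub : List.Subperm ws cs := List.subperm_ext_iff.mpr (fun x _ => h x)
    have hsub' : List.Subperm (PySem.List.sorted ws (fun x => x) false) (PySem.List.sorted cs (fun x => x) false) :=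
      ((PySem.List.sorted_perm ws (fun x => x) false).subperm.trans hsub).trans
        (PySem.List.sorted_perm cs (fun x => x) false).symm.subperm
    exact List.sublist_of_subperm_of_pairwise hsub'
      (PySem.List.sorted_pairwise ws (fun x => x))
      (PySem.List.sorted_pairwise cs (fun x => x))

-- ===== VERDICT (by name: the statement is the Claim_ definition above) =====
theorem allword_spec : Claim_equal_allword := by
  intro s words _ _
  unfold Spec_allword allword allword_alt
  have hA := allwordLoopA_iff words (allwordChunks s (PySem.Str.len (words.headD "")))
  have hB := allwordMerge_iff (PySem.List.sorted words (fun x => x) false)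
    (PySem.List.sorted (allwordChunks s (PySem.Str.len (words.headD ""))) (fun x => x) false)
    (PySem.List.sorted_pairwise words (fun x => x))
    (PySem.List.sorted_pairwise _ (fun x => x))
  rw [sorted_sublist_iff_count] at hB
  rw [Bool.eq_iff_iff, hA, hB]
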